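-- pv_equiv track=rewrite | github.com/SourceMation/images | containers/docker-build-order_ad.py | print_forest_as_tree
-- ===== SOURCE A (Python) =====
-- from collections import defaultdict, deque
-- from typing import Dict, List, Optional, Set, Tuple
--
-- def print_forest_as_tree(local_images: Set[str], deps_local: Dict[str, Set[str]]) -> str:
--     # Build edges dep -> dependent
--     children = defaultdict(set)
--     parents = defaultdict(set)
--     for img in local_images:
--         for dep in deps_local.get(img, set()):
--             if dep in local_images:
--                 children[dep].add(img)
--                 parents[img].add(dep)
--
--     roots = [img for img in sorted(local_images) if not parents.get(img)]
--
--     # If cycles exist, we may have no roots for some nodes; show them as extra roots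
--     seen_in_roots = set(roots)
--     for img in sorted(local_images):
--         if img not in seen_in_roots and img not in parents:
--             roots.append(img)
--             seen_in_roots.add(img)
--
--     lines: List[str] = []
--     seen_global: Set[str] = set()
--
--     def dfs(node: str, prefix: str, is_last: bool):
--         connector = "└── " if is_last else "├── "
--         label = node
--         if node in seen_global:
--             label += " (shared)"
--         else:
--             seen_global.add(node)
--
--         lines.append(prefix + connector + label)
--
--         kids = sorted(children.get(node, set()))
--         for i, k in enumerate(kids):
--             last = i == (len(kids) - 1)
--             new_prefix = prefix + ("    " if is_last else "│   ")
--             dfs(k, new_prefix, last)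
--
--     for r_i, r in enumerate(roots):
--         label = r
--         if r in seen_global:
--             label += " (shared)"
--         else:
--             seen_global.add(r)
--
--         lines.append(label)
--         kids = sorted(children.get(r, set()))
--         for i, k in enumerate(kids):
--             dfs(k, "", i == (len(kids) - 1))
--         if r_i != len(roots) - 1:
--             lines.append("")
--
--     return "\n".join(lines) + "\n"
-- ===== SOURCE B (Python) =====
-- def print_forest_as_tree(local_images, deps_local):
--     # Iterative rendering: explicit LIFO stack of frames instead of recursion.
--     children = {}
--     parented = set()
--     for img in local_images:
--         for dep in deps_local.get(img, set()):
--             if dep in local_images: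
--                 children.setdefault(dep, set()).add(img)
--                 parented.add(img)
--
--     roots = [img for img in sorted(local_images) if img not in parented]
--
--     lines = []
--     seen = set()
--     # frame = (kind, node, prefix, is_last); kinds: "root", "node", "blank"
--     entries = []
--     for i, r in enumerate(roots):
--         if i:
--             entries.append(("blank", "", "", False))
--         entries.append(("root", r, "", False))
--     stack = entries[::-1]
--     while stack:
--         kind, node, prefix, is_last = stack.pop()
--         if kind == "blank":
--             lines.append("")
--             continue
--         if node in seen:
--             label = node + " (shared)"
--         else:
--             label = node
--             seen.add(node)
--         if kind == "root":
--             lines.append(label)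
--             child_prefix = ""
--         else:
--             lines.append(prefix + ("└── " if is_last else "├── ") + label)
--             child_prefix = prefix + ("    " if is_last else "│   ")
--         kids = sorted(children.get(node, ()))
--         for i in range(len(kids) - 1, -1, -1):
--             stack.append(("node", kids[i], child_prefix, i == len(kids) - 1))
--     return "\n".join(lines) + "\n"
-- ===== Notes on version B (the rewrite author's own statement) =====
-- stated objective: alternative
-- what changed: The recursive dfs renderer is replaced by an iterative LIFO-stack walk: frames (kind, node, prefix, is_last) are popped from an explicit stack and children are pushed in reverse sorted order (blank separators are pre-seeded between root frames), reproducing A's exact preorder and '(shared)' marking without recursion; A's redundant second roots loop is also dropped and its parents map reduced to a 'parented' set.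
import Mathlib
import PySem

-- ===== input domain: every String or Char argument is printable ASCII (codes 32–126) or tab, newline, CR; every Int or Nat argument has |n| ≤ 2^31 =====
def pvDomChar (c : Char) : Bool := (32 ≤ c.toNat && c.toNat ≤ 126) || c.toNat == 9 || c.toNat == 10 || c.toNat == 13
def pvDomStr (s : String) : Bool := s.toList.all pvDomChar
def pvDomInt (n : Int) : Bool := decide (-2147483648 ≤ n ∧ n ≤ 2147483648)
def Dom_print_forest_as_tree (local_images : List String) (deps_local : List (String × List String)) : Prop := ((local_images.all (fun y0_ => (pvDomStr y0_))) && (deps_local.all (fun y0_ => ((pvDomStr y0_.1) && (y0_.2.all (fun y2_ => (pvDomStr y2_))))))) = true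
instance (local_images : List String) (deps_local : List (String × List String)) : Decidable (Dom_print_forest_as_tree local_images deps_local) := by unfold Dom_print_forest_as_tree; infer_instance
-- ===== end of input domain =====

-- B re-implements A's recursive tree rendering as an explicit stack-driven loop (same output; objective:
-- alternative decomposition, no speed claim). Both ports carry a fuel/budget counter as a totality guard
-- only: inside Pre_ (no dependency cycle reachable from a printed root) it never runs out, and the ports
-- mirror their Pythons exactly.

-- ===== PORT A =====
-- children/parents construction ('for img in local_images: for dep in deps_local.get(img, set()): …')
def pvBuildA (imgsS : List String) (dd : PySem.Dict String (List String)) :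
    PySem.Dict String (PySem.Set String) × PySem.Dict String (PySem.Set String) :=
  imgsS.foldl (fun acc img =>
      (PySem.Set.ofList (dd.getD img [])).foldl (fun acc2 dep =>
          if PySem.Set.contains imgsS dep then
            (acc2.1.insert dep (PySem.Set.add (acc2.1.getD dep []) img),
             acc2.2.insert img (PySem.Set.add (acc2.2.getD img []) dep))
          else acc2) acc)
    (PySem.Dict.empty, PySem.Dict.empty)

-- roots list: the filter comprehension plus A's second ("cycle") loop, which scans sorted(local_images) again
def pvRootsA (imgsS : List String) (pa : PySem.Dict String (PySem.Set String)) : List String :=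
  let roots0 := (PySem.List.sorted imgsS id false).filter (fun img => pa.getD img [] == [])
  ((PySem.List.sorted imgsS id false).foldl (fun acc img =>
      if !(PySem.Set.contains acc.2 img) && !(pa.contains img) then
        (acc.1 ++ [img], PySem.Set.add acc.2 img)
      else acc) (roots0, PySem.Set.ofList roots0)).1

-- the recursive dfs; the Nat argument is a fuel bound on the recursion depth (totality guard only —
-- inside Pre_ the depth is at most the number of images, so fuel (#images + 1) never runs out)
def pvDfsA (ch : PySem.Dict String (PySem.Set String)) :
    Nat → String → String → Bool → (List String × PySem.Set String) → (List String × PySem.Set String)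
  | 0, _, _, _, st => st
  | Nat.succ d, node, prefix_, isLast, st =>
    let connector := if isLast then "└── " else "├── "
    let ls := if PySem.Set.contains st.2 node then (node ++ " (shared)", st.2)
              else (node, PySem.Set.add st.2 node)
    let kids := PySem.List.sorted (ch.getD node []) id false
    (PySem.List.enumerate kids 0).foldl
      (fun st ik => pvDfsA ch d ik.2 (prefix_ ++ (if isLast then "    " else "│   "))
        (ik.1 == PySem.List.len kids - 1) st)
      (st.1 ++ [prefix_ ++ connector ++ ls.1], ls.2)

-- body of A's root loop (label the root, then dfs over its sorted kids with empty prefix)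
def pvProcRoot (ch : PySem.Dict String (PySem.Set String)) (Nf : Nat) (r : String)
    (st : List String × PySem.Set String) : List String × PySem.Set String :=
  let ls := if PySem.Set.contains st.2 r then (r ++ " (shared)", st.2) else (r, PySem.Set.add st.2 r)
  let kids := PySem.List.sorted (ch.getD r []) id false
  (PySem.List.enumerate kids 0).foldl
    (fun st ik => pvDfsA ch Nf ik.2 "" (ik.1 == PySem.List.len kids - 1) st)
    (st.1 ++ [ls.1], ls.2)

def print_forest_as_tree (local_images : List String) (deps_local : List (String × List String)) : String :=
  let imgsS := PySem.Set.ofList local_images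
  let chpa := pvBuildA imgsS (PySem.Dict.mk deps_local)
  let roots := pvRootsA imgsS chpa.2
  let Nf := imgsS.length + 1
  let st := (PySem.List.enumerate roots 0).foldl (fun st ir =>
      if ir.1 != PySem.List.len roots - 1 then
        ((pvProcRoot chpa.1 Nf ir.2 st).1 ++ [""], (pvProcRoot chpa.1 Nf ir.2 st).2)
      else pvProcRoot chpa.1 Nf ir.2 st)
    (([] : List String), ([] : PySem.Set String))
  PySem.Str.join "\n" st.1 ++ "\n"

-- ===== PORT B =====
-- Source B builds the same children map but only a 'parented' set instead of a parents map
def pvBuildB (imgsS : List String) (dd : PySem.Dict String (List String)) :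
    PySem.Dict String (PySem.Set String) × PySem.Set String :=
  imgsS.foldl (fun acc img =>
      (PySem.Set.ofList (dd.getD img [])).foldl (fun acc2 dep =>
          if PySem.Set.contains imgsS dep then
            (acc2.1.insert dep (PySem.Set.add (acc2.1.getD dep []) img),
             PySem.Set.add acc2.2 img)
          else acc2) acc)
    (PySem.Dict.empty, [])

-- per-frame work counter, used only to pre-compute the while loop's fuel (totality guard)
def pvCnt (ch : PySem.Dict String (PySem.Set String)) : Nat → String → Nat
  | 0, _ => 0
  | Nat.succ d, n => 1 + ((PySem.List.sorted (ch.getD n []) id false).map (pvCnt ch d)).sum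

-- Source B's while loop over the explicit stack; frames are (kind, node, prefix, is_last) plus a depth
-- budget (totality guard; never exhausted inside Pre_). Stack top is the list head (Source B keeps the
-- reversed list and pops from the end, which is the same processing order).
def pvRun (ch : PySem.Dict String (PySem.Set String)) :
    Nat → List (String × String × String × Bool × Nat) → (List String × PySem.Set String) →
    (List String × PySem.Set String)
  | _, [], st => st
  | fuel, (_, _, _, _, 0) :: rest, st => pvRun ch fuel rest st
  | 0, (_, _, _, _, Nat.succ _) :: _, st => st
  | Nat.succ fuel, (kind, node, pfx, isLast, Nat.succ b) :: rest, st =>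
    if kind == "blank" then pvRun ch fuel rest (st.1 ++ [""], st.2)
    else
      let ls := if PySem.Set.contains st.2 node then (node ++ " (shared)", st.2)
                else (node, PySem.Set.add st.2 node)
      let isRoot := kind == "root"
      let lines' := st.1 ++ [if isRoot then ls.1
                             else pfx ++ (if isLast then "└── " else "├── ") ++ ls.1]
      let cp := if isRoot then "" else pfx ++ (if isLast then "    " else "│   ")
      let kids := PySem.List.sorted (ch.getD node []) id false
      pvRun ch fuel
        (((PySem.List.enumerate kids 0).map
            (fun ik => ("node", ik.2, cp, (ik.1 == PySem.List.len kids - 1 : Bool), b))) ++ rest)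
        (lines', ls.2)
  termination_by fuel stack _ => (fuel, stack.length)

def print_forest_as_tree_alt (local_images : List String) (deps_local : List (String × List String)) : String :=
  let imgsS := PySem.Set.ofList local_images
  let chp := pvBuildB imgsS (PySem.Dict.mk deps_local)
  let roots := (PySem.List.sorted imgsS id false).filter (fun img => !(PySem.Set.contains chp.2 img))
  let Nf := imgsS.length + 1
  let entries := (PySem.List.enumerate roots 0).foldl (fun acc ir =>
      acc ++ (if ir.1 == 0 then [] else [("blank", "", "", false, 1)])
          ++ [("root", ir.2, "", false, Nf + 1)]) []
  let st := pvRun chp.1 ((entries.map (fun f => pvCnt chp.1 f.2.2.2.2 f.2.1)).sum) entries ([], [])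
  PySem.Str.join "\n" st.1 ++ "\n"

-- ===== PRECONDITION & SPEC =====
-- helpers for Pre_: the "is a child of" relation read off the input and its bounded closure
-- (standard finite-graph reachability; independent of both ports)
def pvPreKids (l : List String) (d : List (String × List String)) (n : String) : List String :=
  (PySem.Set.ofList l).filter (fun m => ((PySem.Dict.mk d).getD m []).contains n)
def pvPreReach (l : List String) (d : List (String × List String)) (S : List String) : List String :=
  (fun S => PySem.Set.update S (S.flatMap (pvPreKids l d)))^[(PySem.Set.ofList l).length + 1] S
def pvPreRoots (l : List String) (d : List (String × List String)) : List String :=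
  (PySem.Set.ofList l).filter
    (fun m => ((PySem.Dict.mk d).getD m []).filter (fun x => PySem.Set.contains (PySem.Set.ofList l) x) == [])

-- Pre_ excludes (a) association lists with duplicate keys, which do not represent a Python dict (the
-- Lean convention reads the first binding, CPython's dict construction keeps the last), and (b) inputs
-- whose dependency graph has a cycle reachable from a printed root, on which Python A raises
-- RecursionError (and Source B's while loop does not terminate).
def Pre_print_forest_as_tree (local_images : List String) (deps_local : List (String × List String)) : Prop :=
  (deps_local.map (·.1)).Nodup ∧
  ∀ r ∈ pvPreRoots local_images deps_local,
    ∀ n ∈ pvPreReach local_images deps_local [r],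
      n ∉ pvPreReach local_images deps_local (pvPreKids local_images deps_local n)

instance (local_images : List String) (deps_local : List (String × List String)) : Decidable (Pre_print_forest_as_tree local_images deps_local) := by unfold Pre_print_forest_as_tree; infer_instance

def pvWitness_print_forest_as_tree : List String × (List (String × List String)) :=
  (["app", "base", "db"], [("app", ["base"]), ("db", ["base"])])

def Spec_print_forest_as_tree (local_images : List String) (deps_local : List (String × List String)) (out : String) : Prop := out = print_forest_as_tree_alt local_images deps_local
instance (local_images : List String) (deps_local : List (String × List String)) (out : String) : Decidable (Spec_print_forest_as_tree local_images deps_local out) := by unfold Spec_print_forest_as_tree; infer_instance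

-- ===== CLAIM (what is proved, stated in full; the proofs are below) =====
def Claim_equal_print_forest_as_tree : Prop := ∀ (local_images : List String) (deps_local : List (String × List String)), Dom_print_forest_as_tree local_images deps_local → Pre_print_forest_as_tree local_images deps_local → Spec_print_forest_as_tree local_images deps_local (print_forest_as_tree local_images deps_local)

-- ===== LEMMAS AND PROOFS =====

theorem pv_witness_ok :
    Dom_print_forest_as_tree pvWitness_print_forest_as_tree.1 pvWitness_print_forest_as_tree.2 ∧
    Pre_print_forest_as_tree pvWitness_print_forest_as_tree.1 pvWitness_print_forest_as_tree.2 := by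
  decide

-- ----- the two builders produce the same children map -----

theorem pv_foldl_fst_congr {α β γ δ : Type} (l : List α) (sA : β × γ → α → β × γ)
    (sB : β × δ → α → β × δ) (h : ∀ c p q x, (sA (c, p) x).1 = (sB (c, q) x).1) :
    ∀ c p q, (l.foldl sA (c, p)).1 = (l.foldl sB (c, q)).1 := by
  induction l with
  | nil => intro c p q; rfl
  | cons x xs ih =>
    intro c p q
    simp only [List.foldl_cons]
    have h1 := h c p q x
    have h2 := ih (sA (c, p) x).1 (sA (c, p) x).2 (sB (c, q) x).2
    rw [Prod.mk.eta] at h2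
    rw [h2, h1, Prod.mk.eta]

theorem pv_build_fst (imgsS : List String) (dd : PySem.Dict String (List String)) :
    (pvBuildA imgsS dd).1 = (pvBuildB imgsS dd).1 := by
  unfold pvBuildA pvBuildB
  refine pv_foldl_fst_congr _ _ _ (fun c p q img => ?_) _ _ _
  refine pv_foldl_fst_congr _ _ _ (fun c2 p2 q2 dep => ?_) _ _ _
  cases hd : PySem.Set.contains imgsS dep <;> simp only [Bool.false_eq_true, if_true, if_false]

-- ----- 'parented' set of B vs 'parents' map of A -----

theorem pv_rel_inner (imgsS : List String) (img : String) :
    ∀ (l : List String) (c c' : PySem.Dict String (PySem.Set String))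
      (p : PySem.Dict String (PySem.Set String)) (q : PySem.Set String),
    (∀ k, k ∈ q ↔ p.getD k [] ≠ []) →
    (∀ k, k ∈ (l.foldl (fun acc2 dep =>
          if PySem.Set.contains imgsS dep then
            (acc2.1.insert dep (PySem.Set.add (acc2.1.getD dep []) img),
             PySem.Set.add acc2.2 img)
          else acc2) (c', q)).2 ↔
        ((l.foldl (fun acc2 dep =>
          if PySem.Set.contains imgsS dep then
            (acc2.1.insert dep (PySem.Set.add (acc2.1.getD dep []) img),
             acc2.2.insert img (PySem.Set.add (acc2.2.getD img []) dep))
          else acc2) (c, p)).2).getD k [] ≠ []) := by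
  intro l
  induction l with
  | nil => intro c c' p q h k; exact h k
  | cons dep rest ih =>
    intro c c' p q h k
    simp only [List.foldl_cons]
    cases hd : PySem.Set.contains imgsS dep
    · simp only [Bool.false_eq_true, if_false]
      exact ih c c' p q h k
    · simp only [if_true]
      refine ih _ _ _ _ (fun k' => ?_) k
      by_cases hk : k' = img
      · subst hk
        simp only [PySem.Set.mem_add, or_true, true_iff]
        rw [PySem.Dict.getD_insert_self]
        rw [PySem.Set.add_eq_ite]
        split
        · exact List.ne_nil_of_mem (by assumption)
        · simp
      · simp only [PySem.Set.mem_add, hk, or_false]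
        rw [PySem.Dict.getD_insert_of_ne _ _ _ hk]
        exact h k'

theorem pv_build_rel (imgsS : List String) (dd : PySem.Dict String (List String)) :
    ∀ k, k ∈ (pvBuildB imgsS dd).2 ↔ ((pvBuildA imgsS dd).2.getD k []) ≠ [] := by
  unfold pvBuildA pvBuildB
  suffices h : ∀ (l : List String) (c c' : PySem.Dict String (PySem.Set String))
      (p : PySem.Dict String (PySem.Set String)) (q : PySem.Set String),
      (∀ k, k ∈ q ↔ p.getD k [] ≠ []) →
      (∀ k, k ∈ (l.foldl (fun acc img =>
          (PySem.Set.ofList (dd.getD img [])).foldl (fun acc2 dep =>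
            if PySem.Set.contains imgsS dep then
              (acc2.1.insert dep (PySem.Set.add (acc2.1.getD dep []) img),
               PySem.Set.add acc2.2 img)
            else acc2) acc) (c', q)).2 ↔
        ((l.foldl (fun acc img =>
          (PySem.Set.ofList (dd.getD img [])).foldl (fun acc2 dep =>
            if PySem.Set.contains imgsS dep then
              (acc2.1.insert dep (PySem.Set.add (acc2.1.getD dep []) img),
               acc2.2.insert img (PySem.Set.add (acc2.2.getD img []) dep))
            else acc2) acc) (c, p)).2).getD k [] ≠ []) by
    refine fun k => h imgsS PySem.Dict.empty PySem.Dict.empty PySem.Dict.empty [] (fun k' => ?_) k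
    simp [PySem.Dict.getD_empty]
  intro l
  induction l with
  | nil => intro c c' p q h k; exact h k
  | cons img rest ih =>
    intro c c' p q h k
    simp only [List.foldl_cons]
    have hin := pv_rel_inner imgsS img (PySem.Set.ofList (dd.getD img [])) c c' p q h
    have h2 := ih ((PySem.Set.ofList (dd.getD img [])).foldl (fun acc2 dep =>
            if PySem.Set.contains imgsS dep then
              (acc2.1.insert dep (PySem.Set.add (acc2.1.getD dep []) img),
               acc2.2.insert img (PySem.Set.add (acc2.2.getD img []) dep))
            else acc2) (c, p)).1
        ((PySem.Set.ofList (dd.getD img [])).foldl (fun acc2 dep =>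
            if PySem.Set.contains imgsS dep then
              (acc2.1.insert dep (PySem.Set.add (acc2.1.getD dep []) img),
               PySem.Set.add acc2.2 img)
            else acc2) (c', q)).1
        ((PySem.Set.ofList (dd.getD img [])).foldl (fun acc2 dep =>
            if PySem.Set.contains imgsS dep then
              (acc2.1.insert dep (PySem.Set.add (acc2.1.getD dep []) img),
               acc2.2.insert img (PySem.Set.add (acc2.2.getD img []) dep))
            else acc2) (c, p)).2
        ((PySem.Set.ofList (dd.getD img [])).foldl (fun acc2 dep =>
            if PySem.Set.contains imgsS dep then
              (acc2.1.insert dep (PySem.Set.add (acc2.1.getD dep []) img),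
               PySem.Set.add acc2.2 img)
            else acc2) (c', q)).2
        hin
    rw [Prod.mk.eta, Prod.mk.eta] at h2
    exact h2 k

-- ----- the roots lists agree -----

theorem pv_second_loop (pa : PySem.Dict String (PySem.Set String)) (roots0 : List String) :
    ∀ l : List String, (∀ img ∈ l, img ∈ roots0 ∨ pa.contains img = true) →
    (l.foldl (fun acc img =>
      if !(PySem.Set.contains acc.2 img) && !(pa.contains img) then
        (acc.1 ++ [img], PySem.Set.add acc.2 img)
      else acc) (roots0, PySem.Set.ofList roots0)) = (roots0, PySem.Set.ofList roots0) := by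
  intro l
  induction l with
  | nil => intro _; rfl
  | cons img rest ih =>
    intro hl
    simp only [List.foldl_cons]
    have hstep : (if !(PySem.Set.contains (PySem.Set.ofList roots0) img) && !(pa.contains img) then
        (roots0 ++ [img], PySem.Set.add (PySem.Set.ofList roots0) img)
      else ((roots0, PySem.Set.ofList roots0) : List String × PySem.Set String)) = (roots0, PySem.Set.ofList roots0) := by
      rcases hl img (List.mem_cons_self ..) with hm | hc
      · have hct : PySem.Set.contains (PySem.Set.ofList roots0) img = true :=
          (PySem.Set.contains_iff _ _).mpr ((PySem.Set.mem_ofList _ _).mpr hm)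
        rw [hct]; simp
      · rw [hc]; simp
    rw [hstep]
    exact ih (fun i hi => hl i (List.mem_cons_of_mem _ hi))

theorem pv_roots_eq (imgsS : List String) (dd : PySem.Dict String (List String)) :
    pvRootsA imgsS (pvBuildA imgsS dd).2 =
    (PySem.List.sorted imgsS id false).filter (fun img => !(PySem.Set.contains (pvBuildB imgsS dd).2 img)) := by
  have hrel := pv_build_rel imgsS dd
  have hpt : ∀ img, ((pvBuildA imgsS dd).2.getD img [] == []) = !(PySem.Set.contains (pvBuildB imgsS dd).2 img) := by
    intro img
    by_cases hm : img ∈ (pvBuildB imgsS dd).2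
    · have hne := (hrel img).mp hm
      have hc : PySem.Set.contains (pvBuildB imgsS dd).2 img = true := (PySem.Set.contains_iff _ _).mpr hm
      rw [hc]
      simpa using hne
    · have heq : (pvBuildA imgsS dd).2.getD img [] = [] := by
        by_contra hne; exact hm ((hrel img).mpr hne)
      have hc : PySem.Set.contains (pvBuildB imgsS dd).2 img = false := by
        cases hcc : PySem.Set.contains (pvBuildB imgsS dd).2 img
        · rfl
        · exact absurd ((PySem.Set.contains_iff _ _).mp hcc) hm
      rw [heq, hc]; rfl
  have hfil : ((PySem.List.sorted imgsS id false).filter (fun img => (pvBuildA imgsS dd).2.getD img [] == []))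
      = (PySem.List.sorted imgsS id false).filter (fun img => !(PySem.Set.contains (pvBuildB imgsS dd).2 img)) := by
    exact List.filter_congr (fun img _ => hpt img)
  simp only [pvRootsA]
  rw [hfil]
  rw [pv_second_loop (pvBuildA imgsS dd).2
      ((PySem.List.sorted imgsS id false).filter (fun img => !(PySem.Set.contains (pvBuildB imgsS dd).2 img)))
      (PySem.List.sorted imgsS id false) ?_]
  intro img hi
  by_cases hb : ((pvBuildA imgsS dd).2.getD img [] == []) = true
  · left
    refine List.mem_filter.mpr ⟨hi, ?_⟩
    rw [← hpt img]; exact hb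
  · right
    cases hcc : (pvBuildA imgsS dd).2.contains img
    · exfalso
      have := PySem.Dict.getD_of_not_contains (pvBuildA imgsS dd).2 ([] : PySem.Set String) hcc
      rw [this] at hb
      simp at hb
    · rfl

-- ----- the stack machine simulates the recursion -----

theorem pv_sum_enum (ch : PySem.Dict String (PySem.Set String)) (d : Nat) (kids : List String) :
    ((PySem.List.enumerate kids 0).map (fun ik => pvCnt ch d ik.2)).sum = (kids.map (pvCnt ch d)).sum := by
  rw [show (fun ik : Int × String => pvCnt ch d ik.2) = (fun x => pvCnt ch d x) ∘ (fun ik : Int × String => ik.2) from rfl]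
  rw [← List.map_map, PySem.List.map_snd_enumerate]

theorem pv_run_kids (ch : PySem.Dict String (PySem.Set String)) (d : Nat)
    (H : ∀ (node pfx : String) (isLast : Bool) (rest : List (String × String × String × Bool × Nat))
        (st : List String × PySem.Set String) (fuel : Nat),
      pvRun ch (pvCnt ch d node + fuel) (("node", node, pfx, isLast, d) :: rest) st
        = pvRun ch fuel rest (pvDfsA ch d node pfx isLast st)) :
    ∀ (pairs : List (Int × String)) (g : Int → Bool) (np : String)
      (rest : List (String × String × String × Bool × Nat)) (st : List String × PySem.Set String) (fuel : Nat),
    pvRun ch ((pairs.map (fun ik => pvCnt ch d ik.2)).sum + fuel)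
      ((pairs.map (fun ik => (("node", ik.2, np, g ik.1, d) : String × String × String × Bool × Nat))) ++ rest) st
    = pvRun ch fuel rest (pairs.foldl (fun st ik => pvDfsA ch d ik.2 np (g ik.1) st) st) := by
  intro pairs
  induction pairs with
  | nil => intro g np rest st fuel; simp
  | cons ik ps ih =>
    intro g np rest st fuel
    simp only [List.map_cons, List.sum_cons, List.cons_append, List.foldl_cons]
    have harr : pvCnt ch d ik.2 + (ps.map (fun ik => pvCnt ch d ik.2)).sum + fuel
        = pvCnt ch d ik.2 + ((ps.map (fun ik => pvCnt ch d ik.2)).sum + fuel) := by omega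
    rw [harr, H]
    exact ih g np rest _ fuel

theorem pv_run_frame (ch : PySem.Dict String (PySem.Set String)) :
    ∀ (d : Nat) (node pfx : String) (isLast : Bool)
      (rest : List (String × String × String × Bool × Nat)) (st : List String × PySem.Set String) (fuel : Nat),
    pvRun ch (pvCnt ch d node + fuel) (("node", node, pfx, isLast, d) :: rest) st
      = pvRun ch fuel rest (pvDfsA ch d node pfx isLast st) := by
  intro d
  induction d with
  | zero => intro node pfx isLast rest st fuel; simp [pvCnt, pvRun, pvDfsA]
  | succ d ih =>
    intro node pfx isLast rest st fuel
    have hc : pvCnt ch (d+1) node + fuel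
        = ((((PySem.List.sorted (ch.getD node []) id false).map (pvCnt ch d)).sum + fuel)) + 1 := by
      simp only [pvCnt]; omega
    rw [hc]
    simp only [pvRun, pvDfsA]
    simp only [show (("node" : String) == "blank") = false from rfl,
      show (("node" : String) == "root") = false from rfl, Bool.false_eq_true, if_false]
    rw [← pv_sum_enum ch d]
    exact pv_run_kids ch d ih
      (PySem.List.enumerate (PySem.List.sorted (ch.getD node []) id false) 0)
      (fun i => i == PySem.List.len (PySem.List.sorted (ch.getD node []) id false) - 1)
      (pfx ++ (if isLast then "    " else "│   ")) rest _ fuel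

theorem pv_run_root (ch : PySem.Dict String (PySem.Set String)) (Nf : Nat) :
    ∀ (r : String) (rest : List (String × String × String × Bool × Nat))
      (st : List String × PySem.Set String) (fuel : Nat),
    pvRun ch (pvCnt ch (Nf+1) r + fuel) (("root", r, "", false, Nf+1) :: rest) st
      = pvRun ch fuel rest (pvProcRoot ch Nf r st) := by
  intro r rest st fuel
  have hc : pvCnt ch (Nf+1) r + fuel
      = ((((PySem.List.sorted (ch.getD r []) id false).map (pvCnt ch Nf)).sum + fuel)) + 1 := by
    simp only [pvCnt]; omega
  rw [hc]
  simp only [pvRun, pvProcRoot]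
  simp only [show (("root" : String) == "blank") = false from rfl,
    show (("root" : String) == "root") = true from rfl, Bool.false_eq_true, if_false, if_true]
  rw [← pv_sum_enum ch Nf]
  exact pv_run_kids ch Nf (pv_run_frame ch Nf)
    (PySem.List.enumerate (PySem.List.sorted (ch.getD r []) id false) 0)
    (fun i => i == PySem.List.len (PySem.List.sorted (ch.getD r []) id false) - 1)
    "" rest _ fuel

theorem pv_run_blank (ch : PySem.Dict String (PySem.Set String)) :
    ∀ (rest : List (String × String × String × Bool × Nat)) (st : List String × PySem.Set String) (fuel : Nat),
    pvRun ch (1 + fuel) ((("blank", "", "", false, 1) : String × String × String × Bool × Nat) :: rest) st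
      = pvRun ch fuel rest (st.1 ++ [""], st.2) := by
  intro rest st fuel
  rw [Nat.add_comm]
  show pvRun ch (Nat.succ fuel) (("blank", "", "", false, Nat.succ 0) :: rest) st = _
  simp only [pvRun]
  simp only [show (("blank" : String) == "blank") = true from rfl, if_true]

-- A's root loop, written as structural recursion (blank separator in front of every later root)
def pvTail (ch : PySem.Dict String (PySem.Set String)) (Nf : Nat) :
    List String → (List String × PySem.Set String) → (List String × PySem.Set String)
  | [], st => st
  | r :: rs, st => pvTail ch Nf rs (pvProcRoot ch Nf r (st.1 ++ [""], st.2))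

theorem pv_run_tail (ch : PySem.Dict String (PySem.Set String)) (Nf : Nat) :
    ∀ (rs : List String) (rest : List (String × String × String × Bool × Nat))
      (st : List String × PySem.Set String) (fuel : Nat),
    pvRun ch (((rs.flatMap (fun x => [(("blank", "", "", false, 1) : String × String × String × Bool × Nat),
          ("root", x, "", false, Nf+1)])).map (fun f => pvCnt ch f.2.2.2.2 f.2.1)).sum + fuel)
      ((rs.flatMap (fun x => [("blank", "", "", false, 1), ("root", x, "", false, Nf+1)])) ++ rest) st
    = pvRun ch fuel rest (pvTail ch Nf rs st) := by
  intro rs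
  induction rs with
  | nil => intro rest st fuel; simp [pvTail]
  | cons x rs ih =>
    intro rest st fuel
    simp only [List.flatMap_cons, List.map_cons, List.sum_cons, List.cons_append, pvTail,
      List.nil_append]
    have harr : pvCnt ch 1 "" + (pvCnt ch (Nf+1) x +
          ((rs.flatMap (fun x => [(("blank", "", "", false, 1) : String × String × String × Bool × Nat),
            ("root", x, "", false, Nf+1)])).map (fun f => pvCnt ch f.2.2.2.2 f.2.1)).sum) + fuel
        = 1 + (pvCnt ch (Nf+1) x +
          (((rs.flatMap (fun x => [(("blank", "", "", false, 1) : String × String × String × Bool × Nat),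
            ("root", x, "", false, Nf+1)])).map (fun f => pvCnt ch f.2.2.2.2 f.2.1)).sum + fuel)) := by
      have h1 : pvCnt ch 1 "" = 1 := by simp [pvCnt]
      omega
    rw [harr]
    rw [pv_run_blank]
    rw [pv_run_root]
    exact ih rest _ fuel

theorem pv_run_tail0 (ch : PySem.Dict String (PySem.Set String)) (Nf : Nat)
    (rs : List String) (st : List String × PySem.Set String) :
    pvRun ch (((rs.flatMap (fun x => [(("blank", "", "", false, 1) : String × String × String × Bool × Nat),
          ("root", x, "", false, Nf+1)])).map (fun f => pvCnt ch f.2.2.2.2 f.2.1)).sum)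
      (rs.flatMap (fun x => [("blank", "", "", false, 1), ("root", x, "", false, Nf+1)])) st
    = pvTail ch Nf rs st := by
  have h := pv_run_tail ch Nf rs [] st 0
  rw [List.append_nil, Nat.add_zero] at h
  rw [h]
  simp only [pvRun]

theorem pv_a_top (ch : PySem.Dict String (PySem.Set String)) (Nf : Nat) (L : Int) :
    ∀ (rs : List String) (s : Int) (st : List String × PySem.Set String), s + rs.length = L →
    (PySem.List.enumerate rs s).foldl (fun st ir =>
      if ir.1 != L - 1 then
        ((pvProcRoot ch Nf ir.2 st).1 ++ [""], (pvProcRoot ch Nf ir.2 st).2)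
      else pvProcRoot ch Nf ir.2 st) st
    = (match rs with
       | [] => st
       | r :: rs' => pvTail ch Nf rs' (pvProcRoot ch Nf r st)) := by
  intro rs
  induction rs with
  | nil => intro s st _; rfl
  | cons r rs ih =>
    intro s st hs
    rw [PySem.List.enumerate_cons]
    simp only [List.foldl_cons]
    cases rs with
    | nil =>
      have hlast : (s != L - 1) = false := by
        simp only [List.length_cons, List.length_nil, Nat.cast_add, Nat.cast_one, Nat.cast_zero] at hs
        simp only [bne, beq_iff_eq, Bool.not_eq_false', beq_iff_eq]
        omega
      rw [hlast]
      simp only [Bool.false_eq_true, if_false]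
      rfl
    | cons r2 rs2 =>
      have hne : (s != L - 1) = true := by
        simp only [List.length_cons, Nat.cast_add, Nat.cast_one] at hs
        simp only [bne, Bool.not_eq_true', beq_eq_false_iff_ne, ne_eq]
        omega
      rw [hne]
      simp only [if_true]
      have hlen : (s + 1) + ((r2 :: rs2) : List String).length = L := by
        simp only [List.length_cons] at hs ⊢
        push_cast at hs ⊢
        omega
      rw [ih (s+1) ((pvProcRoot ch Nf r st).1 ++ [""], (pvProcRoot ch Nf r st).2) hlen]
      simp only [pvTail]

theorem pv_b_entries_aux (Nf : Nat) :
    ∀ (rs : List String) (s : Int) (acc : List (String × String × String × Bool × Nat)), 1 ≤ s →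
    (PySem.List.enumerate rs s).foldl (fun acc ir =>
      acc ++ (if ir.1 == 0 then [] else [("blank", "", "", false, 1)]) ++ [("root", ir.2, "", false, Nf+1)]) acc
    = acc ++ rs.flatMap (fun x => [("blank", "", "", false, 1), ("root", x, "", false, Nf+1)]) := by
  intro rs
  induction rs with
  | nil => intro s acc _; simp
  | cons x rs ih =>
    intro s acc hs
    rw [PySem.List.enumerate_cons]
    simp only [List.foldl_cons]
    have h0 : (s == 0) = false := by
      simp only [beq_eq_false_iff_ne, ne_eq]
      omega
    rw [h0]
    simp only [Bool.false_eq_true, if_false]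
    rw [ih (s+1) _ (by omega)]
    simp [List.append_assoc]

theorem pv_b_entries (Nf : Nat) (roots : List String) :
    (PySem.List.enumerate roots 0).foldl (fun acc ir =>
      acc ++ (if ir.1 == 0 then [] else [("blank", "", "", false, 1)]) ++ [("root", ir.2, "", false, Nf+1)]) []
    = (match roots with
       | [] => []
       | r :: rs => ("root", r, "", false, Nf+1) ::
          rs.flatMap (fun x => [("blank", "", "", false, 1), ("root", x, "", false, Nf+1)])) := by
  cases roots with
  | nil => rfl
  | cons r rs =>
    rw [PySem.List.enumerate_cons]
    simp only [List.foldl_cons]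
    rw [show ((0:Int) == 0) = true from rfl]
    simp only [if_true, List.nil_append]
    rw [pv_b_entries_aux Nf rs (0+1) _ (by omega)]
    simp

theorem pv_main (ch : PySem.Dict String (PySem.Set String)) (Nf : Nat) (R : List String) :
    ((PySem.List.enumerate R 0).foldl (fun st ir =>
      if ir.1 != PySem.List.len R - 1 then
        ((pvProcRoot ch Nf ir.2 st).1 ++ [""], (pvProcRoot ch Nf ir.2 st).2)
      else pvProcRoot ch Nf ir.2 st) (([] : List String), ([] : PySem.Set String)))
    = pvRun ch ((((PySem.List.enumerate R 0).foldl (fun acc ir =>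
          acc ++ (if ir.1 == 0 then [] else [("blank", "", "", false, 1)]) ++ [("root", ir.2, "", false, Nf+1)]) []).map
          (fun f => pvCnt ch f.2.2.2.2 f.2.1)).sum)
        ((PySem.List.enumerate R 0).foldl (fun acc ir =>
          acc ++ (if ir.1 == 0 then [] else [("blank", "", "", false, 1)]) ++ [("root", ir.2, "", false, Nf+1)]) [])
        ([], []) := by
  rw [pv_b_entries]
  rw [pv_a_top ch Nf (PySem.List.len R) R 0 _ (by simp [PySem.List.len_eq])]
  cases R with
  | nil => simp only [pvRun]
  | cons r rs =>
    simp only [List.map_cons, List.sum_cons]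
    rw [pv_run_root]
    rw [pv_run_tail0]

-- ===== VERDICT (by name: the statement is the Claim_ definition above) =====
theorem print_forest_as_tree_spec : Claim_equal_print_forest_as_tree := by
  intro local_images deps_local _hDom _hPre
  unfold Spec_print_forest_as_tree
  simp only [print_forest_as_tree, print_forest_as_tree_alt]
  rw [pv_build_fst, pv_roots_eq]
  rw [pv_main]
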